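-- pv_equiv track=rewrite | github.com/AnandaRachmawati/Phyton | Praktikum Dasar Pemograman/list of list/list of list praktikum.py | listKosong
-- ===== SOURCE A (Python) =====
-- def firstList(L):
--     return L[0]
--
-- def tailList(S):
--     return S[1:]
--
-- def IsEmptyLoL(S):
--     return S == []
--
-- def listKosong(b):
--     if IsEmptyLoL(b):
--         return 0
--     else:
--         if IsEmptyLoL(firstList(b)):
--             return 1 + listKosong(tailList(b))
--         else:
--             return listKosong(tailList(b))
-- ===== SOURCE B (Python) =====
-- def listKosong(b):
--     count = 0
--     for x in b:
--         if x == []: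
--             count += 1
--     return count
-- ===== Notes on version B (the rewrite author's own statement) =====
-- stated objective: simpler
-- what changed: Replaces head/tail slicing recursion with a single iterative pass keeping a count accumulator.
import Mathlib
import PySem

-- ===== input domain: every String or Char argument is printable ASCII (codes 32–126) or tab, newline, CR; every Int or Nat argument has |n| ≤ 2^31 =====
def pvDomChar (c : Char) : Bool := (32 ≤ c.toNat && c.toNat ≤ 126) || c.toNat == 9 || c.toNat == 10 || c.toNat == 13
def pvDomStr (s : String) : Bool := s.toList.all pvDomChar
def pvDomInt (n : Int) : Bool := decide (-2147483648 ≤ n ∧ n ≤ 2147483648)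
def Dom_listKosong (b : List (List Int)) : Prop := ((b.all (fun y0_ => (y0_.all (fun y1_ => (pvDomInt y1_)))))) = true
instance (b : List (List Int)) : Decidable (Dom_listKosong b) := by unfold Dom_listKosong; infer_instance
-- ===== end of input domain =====

-- B replaces A's head/tail slicing recursion with a single iterative accumulator pass (simpler).


-- ===== PORT A =====
-- helpers of A, ported literally (firstList: L[0]; tailList: S[1:]; IsEmptyLoL: S == [])
def firstList (L : List (List Int)) : Option (List Int) := PySem.List.pyGet? L 0
def tailList (S : List (List Int)) : List (List Int) := PySem.List.slice S (some 1) none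
def IsEmptyLoL {a : Type} [BEq a] (S : List a) : Bool := S == []
def listKosong (b : List (List Int)) : Int :=
  if IsEmptyLoL b then 0
  else
    if (firstList b).any (fun h => IsEmptyLoL h) then 1 + listKosong (tailList b)
    else listKosong (tailList b)
termination_by b.length
decreasing_by all_goals simp [tailList, PySem.List.slice_from_one]; cases b <;> simp_all [IsEmptyLoL]

-- ===== PORT B =====
-- B: one iterative pass with a count accumulator
def listKosong_alt (b : List (List Int)) : Int :=
  b.foldl (fun count x => if x == [] then count + 1 else count) 0

-- ===== PRECONDITION & SPEC =====
def Spec_listKosong (b : List (List Int)) (out : Int) : Prop := out = listKosong_alt b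
instance (b : List (List Int)) (out : Int) : Decidable (Spec_listKosong b out) := by unfold Spec_listKosong; infer_instance

-- ===== CLAIM (what is proved, stated in full; the proofs are below) =====
def Claim_equal_listKosong : Prop := ∀ (b : List (List Int)), Dom_listKosong b → Spec_listKosong b (listKosong b)

-- ===== LEMMAS AND PROOFS =====

-- ===== VERDICT (by name: the statement is the Claim_ definition above) =====
lemma listKosong_nil : listKosong [] = 0 := by
  rw [listKosong]; simp [IsEmptyLoL]

lemma listKosong_cons (h : List Int) (t : List (List Int)) :
    listKosong (h :: t) = (if h = [] then 1 + listKosong t else listKosong t) := by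
  rw [listKosong]
  simp only [IsEmptyLoL, firstList, tailList, PySem.List.slice_from_one]
  by_cases hh : h = [] <;> simp [hh, PySem.List.pyGet?, PySem.List.pyIdx?]

lemma foldl_count (l : List (List Int)) (c : Int) :
    l.foldl (fun count x => if x == [] then count + 1 else count) c = c + listKosong l := by
  induction l generalizing c with
  | nil => simp [listKosong_nil]
  | cons h t ih =>
    rw [listKosong_cons, List.foldl_cons]
    by_cases hh : h = []
    · have hb : (h == ([] : List Int)) = true := by simpa using hh
      rw [hb, if_pos rfl, if_pos hh, ih]; ring
    · have hb : (h == ([] : List Int)) = false := by simpa using hh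
      rw [hb, if_neg (by simp), if_neg hh, ih]

theorem listKosong_spec : Claim_equal_listKosong := by
  intro b _
  unfold Spec_listKosong listKosong_alt
  rw [foldl_count]; ring
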